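-- pv_equiv track=rewrite | github.com/pypi-data/pypi-mirror-314 | packages/ubicoders-vrobots/ubicoders_vrobots-2.0.35.tar.gz/ubicoders_vrobots-2.0.35/src/ubicoders_vrobots/vrobots_msgs/gen_states_printer_dotnet.py | generate_unity_script
-- ===== SOURCE A (Python) =====
-- def generate_unity_script(fields):
--     body = ""
--     for name, field_type in fields:
--         if field_type == 'Vec3Msg':
--             body += f"            if (_stateType == StateTypes.{name.upper()}) PrintVec3Msg(_states.{name.capitalize()});\n"
--         elif field_type == 'Vec4Msg':
--             body += f"            if (_stateType == StateTypes.{name.upper()}) PrintVec4Msg(_states.{name.capitalize()});\n"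
--         elif field_type == 'float' or field_type == 'double':
--             body += f"            if (_stateType == StateTypes.{name.upper()}) Debug.Log(\"{name.capitalize()}: \" + _states.{name.capitalize()});\n"
--         elif field_type == 'uint32':
--             body += f"            if (_stateType == StateTypes.{name.upper()}) Debug.Log(\"{name.capitalize()}: \" + _states.{name.capitalize()});\n"
--         elif field_type == 'string':
--             body += f"            if (_stateType == StateTypes.{name.upper()}) Debug.Log(\"{name.capitalize()}: \" + _states.{name.capitalize()});\n"
--         # Add other field types as needed
--
--     return body
-- ===== SOURCE B (Python) =====
-- def generate_unity_script(fields):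
--     # Recursive, back-to-front: emit the line for the head field (merging the two
--     # Vec cases via field_type[:4] and the four scalar cases via one membership
--     # test) and prepend it to the script generated for the remaining fields.
--     if not fields:
--         return ""
--     (name, field_type), rest = fields[0], fields[1:]
--     tail = generate_unity_script(rest)
--     cap = name.capitalize()
--     if field_type in ('Vec3Msg', 'Vec4Msg'):
--         action = f"Print{field_type[:4]}Msg(_states.{cap});"
--     elif field_type in ('float', 'double', 'uint32', 'string'):
--         action = f'Debug.Log("{cap}: " + _states.{cap});'
--     else:
--         return tail
--     return f"            if (_stateType == StateTypes.{name.upper()}) {action}\n" + tail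
-- ===== Notes on version B (the rewrite author's own statement) =====
-- stated objective: alternative
-- what changed: Replaces A's iterative five-way if/elif chain with a string accumulator by a recursive back-to-front construction that merges the branches into two: the Vec pair is formatted via one template using field_type[:4], the four scalar types via one membership test.
import Mathlib
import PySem

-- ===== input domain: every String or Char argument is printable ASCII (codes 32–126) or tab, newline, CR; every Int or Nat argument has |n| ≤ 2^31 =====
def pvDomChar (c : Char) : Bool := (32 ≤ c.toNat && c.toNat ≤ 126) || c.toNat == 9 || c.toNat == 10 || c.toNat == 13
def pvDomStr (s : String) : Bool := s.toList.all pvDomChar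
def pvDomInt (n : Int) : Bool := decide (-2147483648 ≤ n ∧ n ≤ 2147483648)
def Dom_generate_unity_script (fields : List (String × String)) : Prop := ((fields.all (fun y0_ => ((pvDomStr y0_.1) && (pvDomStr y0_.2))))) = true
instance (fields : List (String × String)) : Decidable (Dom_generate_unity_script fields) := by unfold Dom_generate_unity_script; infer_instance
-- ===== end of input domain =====

-- B rebuilds the script recursively back-to-front, merging A's five branches into two
-- (the Vec pair via field_type[:4], the four scalars via one membership test)
-- instead of A's iterative five-way if/elif chain with a string accumulator
-- (objective: alternative decomposition; same cost).

-- ===== PORT A =====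
-- name.capitalize(): first char upper-cased, rest lower-cased (exact on the ASCII domain,
-- where Python's title-casing of the first char coincides with upper-casing).
def pyCapitalize (cs : List Char) : List Char :=
  match cs with
  | [] => []
  | c :: t => PySem.Chars.upperChar c :: PySem.Chars.lower t

def aPrefix (name : List Char) : List Char :=
  "            if (_stateType == StateTypes.".toList ++ PySem.Chars.upper name ++ ") ".toList

def aLineVec3 (name : List Char) : List Char :=
  aPrefix name ++ "PrintVec3Msg(_states.".toList ++ pyCapitalize name ++ ");\n".toList

def aLineVec4 (name : List Char) : List Char :=
  aPrefix name ++ "PrintVec4Msg(_states.".toList ++ pyCapitalize name ++ ");\n".toList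

def aLineDbg (name : List Char) : List Char :=
  aPrefix name ++ "Debug.Log(\"".toList ++ pyCapitalize name ++ ": \" + _states.".toList
    ++ pyCapitalize name ++ ");\n".toList

def aStep (body : List Char) (p : String × String) : List Char :=
  let name := p.1.toList
  let ft := p.2
  if ft == "Vec3Msg" then body ++ aLineVec3 name
  else if ft == "Vec4Msg" then body ++ aLineVec4 name
  else if ft == "float" || ft == "double" then body ++ aLineDbg name
  else if ft == "uint32" then body ++ aLineDbg name
  else if ft == "string" then body ++ aLineDbg name
  else body

def generate_unity_script (fields : List (String × String)) : String :=
  String.ofList (fields.foldl aStep [])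

-- ===== PORT B =====
-- field_type[:4] ported as List.take 4 (exact: a nonnegative-bound Python slice from 0).
def bEmit : List (String × String) → List Char
  | [] => []
  | (name, ft) :: rest =>
    let tail := bEmit rest
    let cap := pyCapitalize name.toList
    if ["Vec3Msg", "Vec4Msg"].contains ft then
      ("            if (_stateType == StateTypes.".toList ++ PySem.Chars.upper name.toList
        ++ ") ".toList ++ "Print".toList ++ ft.toList.take 4 ++ "Msg(_states.".toList
        ++ cap ++ ");".toList ++ "\n".toList) ++ tail
    else if ["float", "double", "uint32", "string"].contains ft then
      ("            if (_stateType == StateTypes.".toList ++ PySem.Chars.upper name.toList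
        ++ ") ".toList ++ "Debug.Log(\"".toList ++ cap ++ ": \" + _states.".toList
        ++ cap ++ ");".toList ++ "\n".toList) ++ tail
    else tail

def generate_unity_script_alt (fields : List (String × String)) : String :=
  String.ofList (bEmit fields)

-- ===== PRECONDITION & SPEC =====
def Spec_generate_unity_script (fields : List (String × String)) (out : String) : Prop := out = generate_unity_script_alt fields
instance (fields : List (String × String)) (out : String) : Decidable (Spec_generate_unity_script fields out) := by unfold Spec_generate_unity_script; infer_instance

-- ===== CLAIM (what is proved, stated in full; the proofs are below) =====
def Claim_equal_generate_unity_script : Prop := ∀ (fields : List (String × String)), Dom_generate_unity_script fields → Spec_generate_unity_script fields (generate_unity_script fields)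

-- ===== LEMMAS AND PROOFS =====
-- A's per-field contribution, named for the induction
def aLine (p : String × String) : List Char :=
  if p.2 == "Vec3Msg" then aLineVec3 p.1.toList
  else if p.2 == "Vec4Msg" then aLineVec4 p.1.toList
  else if p.2 == "float" || p.2 == "double" then aLineDbg p.1.toList
  else if p.2 == "uint32" then aLineDbg p.1.toList
  else if p.2 == "string" then aLineDbg p.1.toList
  else []

theorem aStep_eq_append (body : List Char) (p : String × String) :
    aStep body p = body ++ aLine p := by
  unfold aStep aLine
  split_ifs <;> simp_all

-- B's head contribution equals A's head contribution
theorem bEmit_cons (p : String × String) (t : List (String × String)) :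
    bEmit (p :: t) = aLine p ++ bEmit t := by
  obtain ⟨name, ft⟩ := p
  by_cases h1 : ft = "Vec3Msg"
  · subst h1
    simp [bEmit, aLine, aLineVec3, aPrefix]
  by_cases h2 : ft = "Vec4Msg"
  · subst h2
    simp [bEmit, aLine, aLineVec4, aPrefix, h1]
  by_cases h3 : ft = "float"
  · subst h3
    simp [bEmit, aLine, aLineDbg, aPrefix, h1, h2]
  by_cases h4 : ft = "double"
  · subst h4
    simp [bEmit, aLine, aLineDbg, aPrefix, h1, h2, h3]
  by_cases h5 : ft = "uint32"
  · subst h5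
    simp [bEmit, aLine, aLineDbg, aPrefix, h1, h2, h3, h4]
  by_cases h6 : ft = "string"
  · subst h6
    simp [bEmit, aLine, aLineDbg, aPrefix, h1, h2, h3, h4, h5]
  · simp [bEmit, aLine, h1, h2, h3, h4, h5, h6]

-- A's left fold from any accumulator produces the accumulator followed by B's recursion
theorem foldl_aStep_eq (l : List (String × String)) (acc : List Char) :
    l.foldl aStep acc = acc ++ bEmit l := by
  induction l generalizing acc with
  | nil => simp [bEmit]
  | cons p t ih =>
      rw [List.foldl_cons, aStep_eq_append, ih, bEmit_cons, List.append_assoc]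

-- ===== VERDICT (by name: the statement is the Claim_ definition above) =====
theorem generate_unity_script_spec : Claim_equal_generate_unity_script := by
  intro fields _
  unfold Spec_generate_unity_script generate_unity_script generate_unity_script_alt
  rw [foldl_aStep_eq, List.nil_append]
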